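-- pv_equiv track=rewrite | github.com/SAWGraph/water-kg | datasets/flowlines/US_NHD_Flowline_HUC01-2-ttl.py | count_by_degree
-- ===== SOURCE A (Python) =====
-- def count_by_degree(deg_list: list) -> dict:
--     deg_counts = {}
--     for node in deg_list:
--         if node[1] not in deg_counts.keys():
--             deg_counts[node[1]] = 1
--         else:
--             deg_counts[node[1]] += 1
--     return dict(sorted(deg_counts.items()))
-- ===== SOURCE B (Python) =====
-- def count_by_degree(deg_list: list) -> dict:
--     # Sort the degree values once, then count each consecutive run of equal
--     # values in a single left-to-right pass; the dict is emitted already in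
--     # ascending key order, so no final sorted() pass is needed.
--     degs = sorted(node[1] for node in deg_list)
--     counts = {}
--     i = 0
--     n = len(degs)
--     while i < n:
--         j = i + 1
--         while j < n and degs[j] == degs[i]:
--             j += 1
--         counts[degs[i]] = j - i
--         i = j
--     return counts
-- ===== Notes on version B (the rewrite author's own statement) =====
-- stated objective: alternative
-- what changed: Instead of hash-counting into a dict and then sorting its items, B sorts the degree values first and counts each consecutive run in one grouping pass, emitting the result already in ascending key order with no final sort.
import Mathlib
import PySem

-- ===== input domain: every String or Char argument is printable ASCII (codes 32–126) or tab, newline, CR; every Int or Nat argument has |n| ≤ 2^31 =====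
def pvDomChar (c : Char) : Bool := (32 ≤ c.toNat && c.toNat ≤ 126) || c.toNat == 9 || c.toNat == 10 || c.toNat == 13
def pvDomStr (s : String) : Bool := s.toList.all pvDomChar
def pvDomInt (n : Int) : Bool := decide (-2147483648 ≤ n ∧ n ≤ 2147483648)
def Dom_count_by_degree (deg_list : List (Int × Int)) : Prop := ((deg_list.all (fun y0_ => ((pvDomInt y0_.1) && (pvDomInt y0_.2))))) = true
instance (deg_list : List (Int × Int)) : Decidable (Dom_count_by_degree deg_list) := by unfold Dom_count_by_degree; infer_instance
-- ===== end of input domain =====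

-- B changes the decomposition (alternative, same asymptotic cost): sort the degree values first,
-- then one run-length grouping pass, instead of A's hash-count followed by sorting the items.

-- ===== PORT A =====
-- dict counting loop, then dict(sorted(deg_counts.items())) — tuples sort lexicographically (sorted2)
def count_by_degree (deg_list : List (Int × Int)) : List (Int × Int) :=
  let deg_counts := deg_list.foldl
    (fun d node =>
      if d.contains node.2 = false then
        d.insert node.2 1
      else
        -- deg_counts[node[1]] += 1 : the key is present in this branch, so getD reads the stored value
        d.insert node.2 (d.getD node.2 0 + 1))
    PySem.Dict.empty
  PySem.List.sorted2 deg_counts.items Prod.fst Prod.snd false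

-- ===== PORT B =====
-- the outer/inner while loops of Source B: consume one run of equal values per step
def pvRuns : List Int → List (Int × Int)
  | [] => []
  | d :: rest =>
    (d, (1 + (rest.takeWhile (· == d)).length : Int)) :: pvRuns (rest.dropWhile (· == d))
  termination_by l => l.length
  decreasing_by exact Nat.lt_succ_of_le (List.length_dropWhile_le _ _)

def count_by_degree_alt (deg_list : List (Int × Int)) : List (Int × Int) :=
  pvRuns (PySem.List.sorted (deg_list.map (fun node => node.2)) (fun x => x) false)

-- ===== PRECONDITION & SPEC =====
def Spec_count_by_degree (deg_list : List (Int × Int)) (out : List (Int × Int)) : Prop := out = count_by_degree_alt deg_list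
instance (deg_list : List (Int × Int)) (out : List (Int × Int)) : Decidable (Spec_count_by_degree deg_list out) := by unfold Spec_count_by_degree; infer_instance

-- ===== CLAIM (what is proved, stated in full; the proofs are below) =====
def Claim_equal_count_by_degree : Prop := ∀ (deg_list : List (Int × Int)), Dom_count_by_degree deg_list → Spec_count_by_degree deg_list (count_by_degree deg_list)

-- ===== LEMMAS AND PROOFS =====

-- elements of the dropWhile tail of a sorted list are strictly above the dropped value
lemma pv_lt_of_mem_dropWhile (d : Int) (rest : List Int)
    (hle : ∀ x ∈ rest, d ≤ x) (hp : rest.Pairwise (· ≤ ·)) :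
    ∀ x ∈ rest.dropWhile (· == d), d < x := by
  induction rest with
  | nil => simp
  | cons a as ih =>
    by_cases ha : a = d
    · subst ha
      simp only [List.dropWhile_cons, BEq.rfl]
      exact ih (fun x hx => hle x (List.mem_cons_of_mem _ hx)) (List.Pairwise.sublist (List.sublist_cons_self _ _) hp)
    · have : ((a == d) = true) = False := by simp [ha]
      simp only [List.dropWhile_cons]
      rw [if_neg (by simp [ha])]
      intro x hx
      rcases List.mem_cons.mp hx with rfl | hx
      · exact lt_of_le_of_ne (hle x (List.mem_cons_self)) (Ne.symm ha)
      · have hax : a ≤ x := (List.pairwise_cons.mp hp).1 x hx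
        have hda : d < a := lt_of_le_of_ne (hle a (List.mem_cons_self)) (Ne.symm ha)
        exact lt_of_lt_of_le hda hax

-- characterisation of the run-length pass on a sorted list
lemma pvRuns_spec (l : List Int) (h : l.Pairwise (· ≤ ·)) :
    ((pvRuns l).map Prod.fst).Pairwise (· < ·) ∧
    (∀ p ∈ pvRuns l, p.2 = (l.count p.1 : Int)) ∧
    (∀ k, k ∈ (pvRuns l).map Prod.fst ↔ k ∈ l) := by
  induction l using pvRuns.induct with
  | case1 => simp [pvRuns]
  | case2 d rest ih =>
    have hle : ∀ x ∈ rest, d ≤ x := (List.pairwise_cons.mp h).1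
    have hpr : rest.Pairwise (· ≤ ·) := (List.pairwise_cons.mp h).2
    have hdrop : rest.Pairwise (· ≤ ·) →
        ((rest.dropWhile (· == d)).Pairwise (· ≤ ·)) :=
      fun hp => List.Pairwise.sublist (List.dropWhile_sublist _) hp
    have hlt := pv_lt_of_mem_dropWhile d rest hle hpr
    obtain ⟨ih1, ih2, ih3⟩ := ih (hdrop hpr)
    have htake : ∀ x ∈ rest.takeWhile (· == d), x = d := by
      intro x hx
      simpa using List.mem_takeWhile_imp hx
    have hcount_take : (rest.takeWhile (· == d)).count d = (rest.takeWhile (· == d)).length := by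
      rw [List.count_eq_length]
      intro x hx
      simp [htake x hx]
    have hsplit : rest = rest.takeWhile (· == d) ++ rest.dropWhile (· == d) :=
      (List.takeWhile_append_dropWhile).symm
    have hcount_drop0 : (rest.dropWhile (· == d)).count d = 0 := by
      rw [List.count_eq_zero]
      intro hmem
      exact absurd rfl (ne_of_gt (hlt d hmem))
    have hcount_rest : rest.count d = (rest.takeWhile (· == d)).length := by
      conv_lhs => rw [hsplit]
      rw [List.count_append, hcount_take, hcount_drop0]
      omega
    refine ⟨?_, ?_, ?_⟩
    · -- keys strictly increasing
      simp only [pvRuns, List.map_cons, List.pairwise_cons]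
      refine ⟨?_, ih1⟩
      intro k hk
      exact hlt k ((ih3 k).mp hk)
    · intro p hp
      simp only [pvRuns, List.mem_cons] at hp
      rcases hp with rfl | hp
      · -- head run
        simp only [List.count_cons_self, hcount_rest]
        push_cast; ring
      · have h2 := ih2 p hp
        have hp1 : p.1 ∈ rest.dropWhile (· == d) := by
          have : p.1 ∈ (pvRuns (rest.dropWhile (· == d))).map Prod.fst :=
            List.mem_map.mpr ⟨p, hp, rfl⟩
          exact (ih3 p.1).mp this
        have hne : p.1 ≠ d := ne_of_gt (hlt p.1 hp1)
        have hcount_take0 : (rest.takeWhile (· == d)).count p.1 = 0 := by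
          rw [List.count_eq_zero]
          intro hm
          exact hne ((htake _ hm) ▸ rfl)
        have hcount_rest' : rest.count p.1 = (rest.dropWhile (· == d)).count p.1 := by
          conv_lhs => rw [hsplit]
          rw [List.count_append, hcount_take0, Nat.zero_add]
        rw [h2, List.count_cons_of_ne hne.symm, hcount_rest']
    · intro k
      simp only [pvRuns, List.map_cons, List.mem_cons, ih3]
      constructor
      · rintro (rfl | hk)
        · exact Or.inl rfl
        · right
          rw [hsplit]
          exact List.mem_append_right _ hk
      · rintro (rfl | hk)
        · exact Or.inl rfl
        · rw [hsplit] at hk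
          rcases List.mem_append.mp hk with hk | hk
          · exact Or.inl (htake _ hk)
          · exact Or.inr hk

-- insertBy only ever compares the inserted element with members of the accumulator
lemma pv_insertBy_congr {α : Type} (f g : α → α → Bool) (X : List α) (x : α) (acc : List α)
    (hfg : ∀ a ∈ X, ∀ b ∈ X, f a b = g a b) (hx : x ∈ X) (hacc : ∀ a ∈ acc, a ∈ X) :
    PySem.List.insertBy f x acc = PySem.List.insertBy g x acc := by
  induction acc with
  | nil => rfl
  | cons y ys ih =>
    have hy : y ∈ X := hacc y List.mem_cons_self
    simp only [PySem.List.insertBy, hfg x hx y hy]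
    split
    · rfl
    · rw [ih (fun a ha => hacc a (List.mem_cons_of_mem _ ha))]

lemma pv_foldl_insertBy_congr {α : Type} (f g : α → α → Bool) (X l acc : List α)
    (hfg : ∀ a ∈ X, ∀ b ∈ X, f a b = g a b) (hl : ∀ a ∈ l, a ∈ X) (hacc : ∀ a ∈ acc, a ∈ X) :
    l.foldl (fun acc x => PySem.List.insertBy f x acc) acc
      = l.foldl (fun acc x => PySem.List.insertBy g x acc) acc := by
  induction l generalizing acc with
  | nil => rfl
  | cons x xs ih =>
    simp only [List.foldl_cons]
    rw [pv_insertBy_congr f g X x acc hfg (hl x List.mem_cons_self) hacc]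
    apply ih
    · exact fun a ha => hl a (List.mem_cons_of_mem _ ha)
    · intro a ha
      rcases (PySem.List.mem_insertBy g x a acc).mp ha with rfl | ha
      · exact hl a List.mem_cons_self
      · exact hacc a ha

-- on a list whose first components are distinct, lexicographic tuple sort = sort by first component
lemma pv_sorted2_eq_sorted_fst (l : List (Int × Int))
    (hinj : ∀ a ∈ l, ∀ b ∈ l, a.1 = b.1 → a = b) :
    PySem.List.sorted2 l Prod.fst Prod.snd false = PySem.List.sorted l Prod.fst false := by
  unfold PySem.List.sorted2 PySem.List.sorted
  simp only [if_neg (by decide : ¬ (false = true))]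
  apply pv_foldl_insertBy_congr _ _ l l [] _ (fun a ha => ha) (by simp)
  intro a ha b hb
  by_cases h1 : a.1 < b.1
  · simp [h1]
  · by_cases h2 : b.1 < a.1
    · simp [h1, h2]
    · have : a = b := hinj a ha b hb (le_antisymm (not_lt.mp h2) (not_lt.mp h1))
      subst this
      simp

-- A's counting loop is Counter(xs) over the second components
lemma pv_loop_eq_counter (deg_list : List (Int × Int)) :
    deg_list.foldl
      (fun d node =>
        if d.contains node.2 = false then d.insert node.2 1
        else d.insert node.2 (d.getD node.2 0 + 1))
      PySem.Dict.empty
      = PySem.Dict.counter (deg_list.map (fun node => node.2)) := by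
  rw [← PySem.Dict.foldl_insert_getD_add_one_eq_counter, List.foldl_map]
  apply PySem.List.foldl_congr_mem
  intro d node _
  by_cases hc : d.contains node.2 = false
  · have hget : d.get? node.2 = none := by
      have := PySem.Dict.contains_eq_isSome_get? d node.2
      rw [hc] at this
      exact Option.not_isSome_iff_eq_none.mp (by simp [← this])
    simp [hc, PySem.Dict.getD, hget]
  · simp [hc]

theorem pv_main (deg_list : List (Int × Int)) :
    count_by_degree deg_list = count_by_degree_alt deg_list := by
  unfold count_by_degree count_by_degree_alt
  rw [pv_loop_eq_counter]
  set xs := deg_list.map (fun node => node.2) with hxs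
  show PySem.List.sorted2 (PySem.Dict.counter xs).items Prod.fst Prod.snd false
      = pvRuns (PySem.List.sorted xs (fun x => x) false)
  rw [PySem.Dict.items_counter]
  set items := (PySem.Set.ofList xs).map (fun k => (k, (xs.count k : Int))) with hitems
  set s := PySem.List.sorted xs (fun x => x) false with hs
  have hsorted : s.Pairwise (· ≤ ·) := by
    have := PySem.List.sorted_pairwise xs (fun x => x) (α := Int)
    simpa using this
  have hperm_s : s.Perm xs := PySem.List.sorted_perm xs _ _
  obtain ⟨h1, h2, h3⟩ := pvRuns_spec s hsorted
  -- runs = their own keys mapped through (k, count k xs)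
  have hruns_eq : pvRuns s = ((pvRuns s).map Prod.fst).map (fun k => (k, (xs.count k : Int))) := by
    rw [List.map_map]
    apply List.ext_getElem (by simp)
    intro i hi hi'
    simp only [List.getElem_map, Function.comp_apply]
    have hmem : (pvRuns s)[i] ∈ pvRuns s := List.getElem_mem _
    have := h2 _ hmem
    have hcnt : s.count (pvRuns s)[i].1 = xs.count (pvRuns s)[i].1 := hperm_s.count_eq _
    ext
    · rfl
    · simp [this, hcnt]
  -- key lists are permutations
  have hkeys_nodup : ((pvRuns s).map Prod.fst).Nodup := h1.nodup
  have hkeys_perm : ((pvRuns s).map Prod.fst).Perm (PySem.Set.ofList xs) := by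
    rw [List.perm_ext_iff_of_nodup hkeys_nodup (PySem.Set.nodup_ofList xs)]
    intro k
    rw [h3 k, PySem.Set.mem_ofList]
    exact ⟨fun h => hperm_s.mem_iff.mp h, fun h => hperm_s.mem_iff.mpr h⟩
  have hperm : (pvRuns s).Perm items := by
    rw [hruns_eq, hitems]
    exact hkeys_perm.map _
  -- items has pairwise-distinct first components
  have hinj : ∀ a ∈ items, ∀ b ∈ items, a.1 = b.1 → a = b := by
    intro a ha b hb hab
    rw [hitems] at ha hb
    obtain ⟨ka, _, rfl⟩ := List.mem_map.mp ha
    obtain ⟨kb, _, rfl⟩ := List.mem_map.mp hb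
    simp only at hab
    rw [hab]
  rw [pv_sorted2_eq_sorted_fst items hinj]
  exact PySem.List.sorted_eq_of_perm_of_pairwise_lt items (pvRuns s) Prod.fst hperm
    (by
      have := h1
      rw [List.pairwise_map] at this
      exact this)

-- ===== VERDICT (by name: the statement is the Claim_ definition above) =====
theorem count_by_degree_spec : Claim_equal_count_by_degree := by
  intro deg_list _
  unfold Spec_count_by_degree
  exact pv_main deg_list
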